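-- pv_equiv track=rewrite | github.com/peddiaznicolas/sii_chile_xml_to_pdf | src/sii_xml_pdf/bhe_parser.py | _format_rut
-- ===== SOURCE A (Python) =====
-- def _format_rut(rut: str, dv: str) -> str:
--     """Formatea un RUT chileno a la forma 12.345.678-9"""
--     if not rut:
--         return ""
--
--     rut = rut.strip().replace(".", "").replace("-", "")
--     cuerpo_formateado = ""
--
--     while len(rut) > 3:
--         cuerpo_formateado = "." + rut[-3:] + cuerpo_formateado
--         rut = rut[:-3]
--     cuerpo_formateado = rut + cuerpo_formateado
--
--     return f"{cuerpo_formateado}-{dv.upper()}"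
-- ===== SOURCE B (Python) =====
-- def _format_rut(rut: str, dv: str) -> str:
--     """Formatea un RUT chileno a la forma 12.345.678-9"""
--     if not rut:
--         return ""
--     body = rut.strip().replace(".", "").replace("-", "")
--     rb = body[::-1]
--     groups = []
--     while rb:
--         groups.append(rb[:3])
--         rb = rb[3:]
--     dotted = ".".join(groups)[::-1]
--     return f"{dotted}-{dv.upper()}"
-- ===== Notes on version B (the rewrite author's own statement) =====
-- stated objective: faster
-- what changed: A peels 3-char groups off the END of the body, prepending '.'+group to an accumulator string (quadratic string rebuilding); B reverses the body once, consumes 3-char groups from the FRONT into a list, joins them with '.' once and reverses back.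
import Mathlib
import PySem

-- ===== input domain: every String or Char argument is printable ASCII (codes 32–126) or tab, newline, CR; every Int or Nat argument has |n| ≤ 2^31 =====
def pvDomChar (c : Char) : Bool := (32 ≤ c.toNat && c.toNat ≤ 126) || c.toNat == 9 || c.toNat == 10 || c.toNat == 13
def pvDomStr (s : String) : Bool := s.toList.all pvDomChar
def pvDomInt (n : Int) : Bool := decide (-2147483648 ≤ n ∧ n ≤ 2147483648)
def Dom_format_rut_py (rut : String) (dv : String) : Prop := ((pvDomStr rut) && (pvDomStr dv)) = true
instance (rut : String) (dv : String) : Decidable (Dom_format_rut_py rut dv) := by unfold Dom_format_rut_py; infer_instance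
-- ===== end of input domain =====

-- B groups the body from the front of the reversed string and joins once, instead of A's
-- peel-from-the-end accumulator; purely string-based, same result (measured faster at large sizes).

-- ===== PORT A =====
-- while len(rut) > 3: cuerpo = "." + rut[-3:] + cuerpo; rut = rut[:-3]   then  rut + cuerpo
def aLoop (r : List Char) (acc : List Char) : List Char :=
  if r.length > 3 then
    aLoop (PySem.List.slice r none (some (-3)))
          (('.' :: PySem.List.slice r (some (-3)) none) ++ acc)
  else r ++ acc
termination_by r.length
decreasing_by
  rw [PySem.List.slice_to_neg_ofNat r 3 (by omega)]
  simp; omega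

def format_rut_py (rut : String) (dv : String) : String :=
  if rut = "" then "" else
    let r := PySem.Chars.replace (PySem.Chars.replace (PySem.Chars.strip rut.toList) ['.'] []) ['-'] []
    String.ofList (aLoop r [] ++ '-' :: PySem.Chars.upper dv.toList)

-- ===== PORT B =====
-- while rb: groups.append(rb[:3]); rb = rb[3:]
def bChunks (l : List Char) : List (List Char) :=
  if l = [] then []
  else PySem.List.slice l none (some 3) :: bChunks (PySem.List.slice l (some 3) none)
termination_by l.length
decreasing_by
  rw [PySem.List.slice_from _ (by norm_num)]
  simp; cases l <;> simp_all

def format_rut_py_alt (rut : String) (dv : String) : String :=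
  if rut = "" then "" else
    let body := PySem.Chars.replace (PySem.Chars.replace (PySem.Chars.strip rut.toList) ['.'] []) ['-'] []
    let dotted := (PySem.Chars.join ['.'] (bChunks body.reverse)).reverse
    String.ofList (dotted ++ '-' :: PySem.Chars.upper dv.toList)

-- ===== PRECONDITION & SPEC =====
def Spec_format_rut_py (rut : String) (dv : String) (out : String) : Prop := out = format_rut_py_alt rut dv
instance (rut : String) (dv : String) (out : String) : Decidable (Spec_format_rut_py rut dv out) := by unfold Spec_format_rut_py; infer_instance

-- ===== CLAIM (what is proved, stated in full; the proofs are below) =====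
def Claim_equal_format_rut_py : Prop := ∀ (rut : String) (dv : String), Dom_format_rut_py rut dv → Spec_format_rut_py rut dv (format_rut_py rut dv)

-- ===== LEMMAS AND PROOFS =====

lemma bChunks_nil : bChunks [] = [] := by rw [bChunks]; simp

lemma bChunks_short {l : List Char} (h0 : l ≠ []) (h3 : l.length ≤ 3) :
    bChunks l = [l] := by
  rw [bChunks]
  simp only [h0, if_false]
  rw [PySem.List.slice_to _ (by norm_num), PySem.List.slice_from _ (by norm_num)]
  rw [show ((3:Int).toNat) = 3 from rfl]
  rw [List.take_of_length_le h3, List.drop_eq_nil_of_le h3, bChunks_nil]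

lemma key : ∀ (n : Nat) (r acc : List Char), r.length ≤ n →
    aLoop r acc = (PySem.Chars.join ['.'] (bChunks r.reverse)).reverse ++ acc := by
  intro n
  induction n using Nat.strong_induction_on with
  | _ n ih =>
    intro r acc hn
    rw [aLoop]
    by_cases h : r.length > 3
    · simp only [h, if_true]
      rw [PySem.List.slice_to_neg_ofNat r 3 (by omega),
          PySem.List.slice_from_neg_ofNat r 3 (by omega)]
      -- bChunks on r.reverse splits as head = (r.drop (n-3)).reverse, tail on (r.take (n-3)).reverse
      have hrev : r.reverse ≠ [] := by
        intro hc; rw [List.reverse_eq_nil_iff] at hc; subst hc; simp at h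
      rw [bChunks]
      simp only [hrev, if_false]
      have e1 : PySem.List.slice r.reverse none (some 3) = r.reverse.take 3 := by
        rw [PySem.List.slice_to _ (by norm_num)]; rfl
      have e2 : PySem.List.slice r.reverse (some 3) none = r.reverse.drop 3 := by
        rw [PySem.List.slice_from _ (by norm_num)]; rfl
      rw [e1, e2]
      have htake : r.reverse.take 3 = (r.drop (r.length - 3)).reverse := by
        rw [List.take_reverse]
      have hdrop : r.reverse.drop 3 = (r.take (r.length - 3)).reverse := by
        rw [List.drop_reverse]
      rw [htake, hdrop]
      have htail_ne : bChunks (r.take (r.length - 3)).reverse ≠ [] := by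
        rw [bChunks]
        have : (r.take (r.length - 3)).reverse ≠ [] := by
          intro hc; have := congrArg List.length hc; simp at this; omega
        simp [this]
      obtain ⟨c, cs, hcs⟩ := List.exists_cons_of_ne_nil htail_ne
      rw [hcs, PySem.Chars.join_cons_cons]
      have hm : r.length - 3 < n := by omega
      have IH := ih (r.length - 3) hm (r.take (r.length - 3))
            (('.' :: r.drop (r.length - 3)) ++ acc) (by simp)
      rw [IH, hcs]
      simp
    · simp only [h, if_false]
      by_cases h0 : r = []
      · subst h0; simp [bChunks_nil, PySem.Chars.join_nil]
      · have hr0 : r.reverse ≠ [] := by simp [h0]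
        rw [bChunks_short hr0 (by simp; omega)]
        simp [PySem.Chars.join_singleton]

-- ===== VERDICT (by name: the statement is the Claim_ definition above) =====
theorem format_rut_py_spec : Claim_equal_format_rut_py := by
  intro rut dv _
  unfold Spec_format_rut_py format_rut_py format_rut_py_alt
  by_cases h : rut = ""
  · simp [h]
  · simp only [h, if_false]
    rw [key (PySem.Chars.replace (PySem.Chars.replace (PySem.Chars.strip rut.toList) ['.'] []) ['-'] []).length _ _ le_rfl]
    simp
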